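-- pv_equiv track=rewrite | github.com/Diucord/Transformer-RUL-Anomaly-Detection | utils.py | detect_failure_index
-- ===== SOURCE A (Python) =====
-- def detect_failure_index(warning_levels, required_consec=10):
--     """
--     Detect failure index based on consecutive 'High' warnings.
--
--     Parameters
--     ----------
--     warning_levels : list[str]
--     required_consec : int
--
--     Returns
--     -------
--     int or None
--     """
--
--     consec = 0
--     failure_idx = None
--
--     for i, lvl in enumerate(warning_levels):
--         if lvl == "High":
--             consec += 1
--             if consec >= required_consec and failure_idx is None:
--                 failure_idx = i - required_consec + 1
--         else:
--             consec = 0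
--
--     return failure_idx
-- ===== SOURCE B (Python) =====
-- def detect_failure_index(warning_levels, required_consec=10):
--     """Run-length scan: walk maximal runs of equal values and return the
--     start index of the first 'High' run that is long enough."""
--     n = len(warning_levels)
--     i = 0
--     while i < n:
--         j = i
--         while j < n and warning_levels[j] == warning_levels[i]:
--             j += 1
--         if warning_levels[i] == "High" and j - i >= required_consec:
--             return i
--         i = j
--     return None
-- ===== Notes on version B (the rewrite author's own statement) =====
-- stated objective: alternative
-- what changed: Replaces the element-wise counter/flag scan with a run-length decomposition: the list is walked as maximal runs of equal values and the start index of the first sufficiently long 'High' run is returned early, instead of carrying a counter and a found-flag to the end of the list.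
-- intended difference: When required_consec < 1 and the list contains 'High', A triggers on the first 'High' element i but reports i - required_consec + 1 (an index past the run start, possibly past the end of the list), while B returns the start index i of that 'High' run, which is the intended detection index. — e.g. on detect_failure_index(["High"], 0): A returns some 1, B returns some 0
import Mathlib
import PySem

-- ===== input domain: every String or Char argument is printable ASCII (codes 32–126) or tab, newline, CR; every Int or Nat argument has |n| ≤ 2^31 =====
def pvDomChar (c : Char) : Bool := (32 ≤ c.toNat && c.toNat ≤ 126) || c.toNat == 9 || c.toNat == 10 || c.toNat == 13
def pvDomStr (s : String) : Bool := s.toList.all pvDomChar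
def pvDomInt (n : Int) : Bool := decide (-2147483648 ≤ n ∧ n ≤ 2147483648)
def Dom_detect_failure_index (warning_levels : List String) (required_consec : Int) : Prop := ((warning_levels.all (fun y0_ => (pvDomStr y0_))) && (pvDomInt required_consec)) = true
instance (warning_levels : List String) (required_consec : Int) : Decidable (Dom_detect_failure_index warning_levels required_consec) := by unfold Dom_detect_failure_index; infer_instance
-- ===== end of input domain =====

-- B replaces A's element-wise counter/flag scan by a run-length decomposition with early
-- return (objective: alternative, same O(n)); on required_consec < 1 with a 'High' present
-- the two differ (stated as D_ below).

-- ===== PORT A =====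
-- The for-loop of A, as structural recursion over the list carrying the index
-- i, the consecutive counter and the found index, exactly as the Python does.
def detectGoA (ws : List String) (i consec : Int) (fidx : Option Int) (req : Int) : Option Int :=
  match ws with
  | [] => fidx
  | lvl :: rest =>
    if lvl == "High" then
      let consec' := consec + 1
      let fidx' := if consec' ≥ req ∧ fidx = none then some (i - req + 1) else fidx
      detectGoA rest (i + 1) consec' fidx' req
    else
      detectGoA rest (i + 1) 0 fidx req

def detect_failure_index (warning_levels : List String) (required_consec : Int) : Option Int :=
  detectGoA warning_levels 0 0 none required_consec

-- ===== PORT B =====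
-- B's outer while loop: peel the maximal run of the head element
-- (inner while = takeWhile/dropWhile), judge a 'High' run directly.
def detectGoB (ws : List String) (start req : Int) : Option Int :=
  match ws with
  | [] => none
  | lvl :: rest =>
    let runLen : Int := 1 + (rest.takeWhile (· == lvl)).length
    let tail := rest.dropWhile (· == lvl)
    if lvl == "High" ∧ runLen ≥ req then some start
    else detectGoB tail (start + runLen) req
termination_by ws.length
decreasing_by
  all_goals exact Nat.lt_succ_of_le (List.length_dropWhile_le _ _)

def detect_failure_index_alt (warning_levels : List String) (required_consec : Int) : Option Int :=
  detectGoB warning_levels 0 required_consec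

-- ===== PRECONDITION & SPEC =====
-- When required_consec < 1 and the list contains "High", A triggers on the first "High"
-- element i but returns i - required_consec + 1 (past the run start, possibly past the end
-- of the list), while B returns the start index i of that run, the intended detection index.
def D_detect_failure_index (warning_levels : List String) (required_consec : Int) : Prop :=
  required_consec < 1 ∧ "High" ∈ warning_levels
instance (warning_levels : List String) (required_consec : Int) : Decidable (D_detect_failure_index warning_levels required_consec) := by unfold D_detect_failure_index; infer_instance

def Spec_detect_failure_index (warning_levels : List String) (required_consec : Int) (out : Option Int) : Prop := ¬ D_detect_failure_index warning_levels required_consec → out = detect_failure_index_alt warning_levels required_consec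
instance (warning_levels : List String) (required_consec : Int) (out : Option Int) : Decidable (Spec_detect_failure_index warning_levels required_consec out) := by unfold Spec_detect_failure_index; infer_instance

def pvDiffWitness_detect_failure_index : List String × Int := (["High"], 0)
def pvDiffWitnessOut_detect_failure_index : (Option Int) × (Option Int) := (some 1, some 0)

-- ===== CLAIM (what is proved, stated in full; the proofs are below) =====
def Claim_unchanged_detect_failure_index : Prop := ∀ (warning_levels : List String) (required_consec : Int), Dom_detect_failure_index warning_levels required_consec → Spec_detect_failure_index warning_levels required_consec (detect_failure_index warning_levels required_consec)
def Claim_changed_detect_failure_index : Prop := Dom_detect_failure_index (pvDiffWitness_detect_failure_index.1) (pvDiffWitness_detect_failure_index.2) ∧ D_detect_failure_index (pvDiffWitness_detect_failure_index.1) (pvDiffWitness_detect_failure_index.2) ∧ detect_failure_index (pvDiffWitness_detect_failure_index.1) (pvDiffWitness_detect_failure_index.2) = pvDiffWitnessOut_detect_failure_index.1 ∧ detect_failure_index_alt (pvDiffWitness_detect_failure_index.1) (pvDiffWitness_detect_failure_index.2) = pvDiffWitnessOut_detect_failure_index.2 ∧ pvDiffWitnessOut_detect_failure_index.1 ≠ 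pvDiffWitnessOut_detect_failure_index.2
def Claim_exact_detect_failure_index : Prop := ∀ (warning_levels : List String) (required_consec : Int), Dom_detect_failure_index warning_levels required_consec → D_detect_failure_index warning_levels required_consec → detect_failure_index warning_levels required_consec ≠ detect_failure_index_alt warning_levels required_consec

-- ===== LEMMAS AND PROOFS =====

-- Once A's loop has found an index, it keeps it.
theorem detectGoA_some (ws : List String) (i consec v req : Int) :
    detectGoA ws i consec (some v) req = some v := by
  induction ws generalizing i consec with
  | nil => rfl
  | cons l rest ih =>
    simp only [detectGoA]
    split_ifs with h1 h2
    · exact absurd h2.2 (by simp)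
    · exact ih _ _
    · exact ih _ _

-- A run of non-'High' elements finds nothing: counter ends at 0.
theorem detectGoA_skip (pre tail : List String) (i consec req : Int)
    (h : ∀ x ∈ pre, x ≠ "High") :
    detectGoA (pre ++ tail) i consec none req
      = detectGoA tail (i + pre.length) (if pre = [] then consec else 0) none req := by
  induction pre generalizing i consec with
  | nil => norm_num
  | cons l rest ih =>
    have hl : l ≠ "High" := h l (by simp)
    simp only [List.cons_append, detectGoA, beq_iff_eq, if_neg hl]
    rw [ih _ _ (fun x hx => h x (List.mem_cons_of_mem _ hx))]
    simp only [ite_self]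
    rw [if_neg (List.cons_ne_nil _ _)]
    congr 1
    push_cast [List.length_cons]; ring

-- Within a run of 'High' with c < req ≤ c + length, A triggers at i - c.
theorem detectGoA_hit (pre tail : List String) (i c req : Int)
    (hpre : ∀ x ∈ pre, x = "High")
    (hc : c < req) (hlen : req ≤ c + pre.length) :
    detectGoA (pre ++ tail) i c none req = some (i - c) := by
  induction pre generalizing i c with
  | nil => simp at hlen; omega
  | cons l rest ih =>
    have hl : l = "High" := hpre l (by simp)
    subst hl
    simp only [List.cons_append, detectGoA, beq_self_eq_true, if_true, and_true]
    by_cases htrig : c + 1 ≥ req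
    · rw [if_pos htrig, detectGoA_some]
      congr 1; omega
    · rw [if_neg htrig]
      have hlen' : req ≤ c + 1 + ↑rest.length := by
        push_cast [List.length_cons] at hlen; omega
      rw [ih (i + 1) (c + 1) (fun x hx => hpre x (List.mem_cons_of_mem _ hx))
            (by omega) hlen']
      congr 1; omega

-- Within a run of 'High' too short to trigger, A just counts.
theorem detectGoA_pass (pre tail : List String) (i c req : Int)
    (hpre : ∀ x ∈ pre, x = "High") (hlen : c + pre.length < req) :
    detectGoA (pre ++ tail) i c none req
      = detectGoA tail (i + pre.length) (c + pre.length) none req := by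
  induction pre generalizing i c with
  | nil => simp
  | cons l rest ih =>
    have hl : l = "High" := hpre l (by simp)
    subst hl
    have hlen' : c + 1 + (rest.length : Int) < req := by
      push_cast [List.length_cons] at hlen; omega
    simp only [List.cons_append, detectGoA, beq_self_eq_true, if_true, and_true]
    rw [if_neg (by omega)]
    rw [ih (i + 1) (c + 1) (fun x hx => hpre x (List.mem_cons_of_mem _ hx)) hlen']
    congr 1 <;> push_cast [List.length_cons] <;> ring

-- A counter carried into a list whose head is not 'High' is irrelevant.
theorem detectGoA_reset (ws : List String) (i c req : Int)
    (h : ∀ x ∈ ws.head?, x ≠ "High") :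
    detectGoA ws i c none req = detectGoA ws i 0 none req := by
  cases ws with
  | nil => rfl
  | cons l rest =>
    have hl : l ≠ "High" := h l (by simp)
    simp [detectGoA, hl]

theorem head?_dropWhile_ne (l : List String) (s : String) :
    ∀ x ∈ (l.dropWhile (· == s)).head?, x ≠ s := by
  intro x hx
  have := List.head?_dropWhile_not (p := (· == s)) (l := l)
  cases hmem : (l.dropWhile (· == s)).head? with
  | none => simp [hmem] at hx
  | some y =>
    simp [hmem] at hx this
    subst hx; exact this

-- Outside D_ the two loops agree.
theorem goA_eq_goB (ws : List String) (i req : Int)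
    (hD : 1 ≤ req ∨ "High" ∉ ws) :
    detectGoA ws i 0 none req = detectGoB ws i req := by
  induction hn : ws.length using Nat.strong_induction_on generalizing ws i with
  | _ n ih =>
  subst hn
  cases ws with
  | nil => simp [detectGoA, detectGoB]
  | cons l rest =>
    have hsplit : l :: rest
        = (l :: rest.takeWhile (· == l)) ++ rest.dropWhile (· == l) := by
      simp [List.takeWhile_append_dropWhile]
    have htail_lt : (rest.dropWhile (· == l)).length < (l :: rest).length :=
      Nat.lt_succ_of_le (List.length_dropWhile_le _ _)
    have hlenpre : (((l :: rest.takeWhile (· == l)).length : Nat) : Int)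
        = 1 + ((rest.takeWhile (· == l)).length : Int) := by
      push_cast [List.length_cons]; ring
    have hDtail : 1 ≤ req ∨ "High" ∉ rest.dropWhile (· == l) := by
      rcases hD with h | h
      · exact Or.inl h
      · exact Or.inr fun hmem => h (List.mem_cons_of_mem _ ((List.dropWhile_sublist _).subset hmem))
    rw [detectGoB]
    by_cases hl : l = "High"
    · subst hl
      have hreq : 1 ≤ req := by
        rcases hD with h | h
        · exact h
        · exact absurd (List.mem_cons_self) h
      have hpre : ∀ x ∈ "High" :: rest.takeWhile (· == "High"), x = "High" := by
        intro x hx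
        rcases List.mem_cons.1 hx with h | h
        · exact h
        · have := List.mem_takeWhile_imp h; simpa using this
      by_cases hlong : 1 + ((rest.takeWhile (· == "High")).length : Int) ≥ req
      · rw [if_pos ⟨by simp, hlong⟩, hsplit,
            detectGoA_hit _ _ i 0 req hpre (by omega) (by rw [hlenpre]; omega)]
        congr 1; omega
      · rw [if_neg (by simpa using hlong), hsplit,
            detectGoA_pass _ _ i 0 req hpre (by rw [hlenpre]; omega)]
        rw [detectGoA_reset _ _ _ _ (head?_dropWhile_ne rest "High")]
        rw [ih _ htail_lt _ _ hDtail rfl]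
        congr 1
        rw [hlenpre]
    · have hpre : ∀ x ∈ l :: rest.takeWhile (· == l), x ≠ "High" := by
        intro x hx
        rcases List.mem_cons.1 hx with h | h
        · simpa [h] using hl
        · have := List.mem_takeWhile_imp h
          simp at this; simpa [this] using hl
      rw [if_neg (by simp [hl])]
      rw [hsplit, detectGoA_skip _ _ i 0 req hpre,
          if_neg (List.cons_ne_nil _ _)]
      rw [ih _ htail_lt _ _ hDtail rfl]
      congr 1
      rw [hlenpre]

-- Inside D_: A returns i + k + 1 - req at the first 'High' (found via findIdx).
theorem goA_neg (ws : List String) (i c req : Int)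
    (hreq : req < 1) (hc : 0 ≤ c) (hmem : "High" ∈ ws) :
    detectGoA ws i c none req
      = some (i + (ws.findIdx (· == "High") : Int) + 1 - req) := by
  induction ws generalizing i c with
  | nil => simp at hmem
  | cons l rest ih =>
    by_cases hl : l = "High"
    · subst hl
      simp only [detectGoA, beq_self_eq_true, if_true, and_true]
      rw [if_pos (by omega), detectGoA_some]
      simp [List.findIdx_cons]
      ring_nf
    · have hmem' : "High" ∈ rest := by
        rcases List.mem_cons.1 hmem with h | h
        · exact absurd h.symm hl
        · exact h
      simp only [detectGoA, beq_iff_eq, if_neg hl]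
      rw [ih (i + 1) 0 (by omega) hmem']
      rw [List.findIdx_cons]
      simp only [beq_iff_eq, hl, if_neg hl, cond_eq_if]
      rw [if_neg (by simpa using hl)]
      congr 1
      push_cast
      ring

-- Inside D_: B returns i + k at the first 'High'.
theorem goB_neg (ws : List String) (i req : Int)
    (hreq : req < 1) (hmem : "High" ∈ ws) :
    detectGoB ws i req = some (i + (ws.findIdx (· == "High") : Int)) := by
  induction hn : ws.length using Nat.strong_induction_on generalizing ws i with
  | _ n ih =>
  subst hn
  cases ws with
  | nil => simp at hmem
  | cons l rest =>
    rw [detectGoB]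
    by_cases hl : l = "High"
    · subst hl
      rw [if_pos ⟨by simp, by have := Int.natCast_nonneg (rest.takeWhile (· == "High")).length; omega⟩]
      simp [List.findIdx_cons]
    · have hmem' : "High" ∈ rest := by
        rcases List.mem_cons.1 hmem with h | h
        · exact absurd h.symm hl
        · exact h
      have hmemd : "High" ∈ rest.dropWhile (· == l) := by
        have : "High" ∉ rest.takeWhile (· == l) := by
          intro hmt
          have := List.mem_takeWhile_imp hmt
          simp at this
          exact hl this.symm
        have := List.takeWhile_append_dropWhile (p := (· == l)) (l := rest)
        rcases List.mem_append.1 (this ▸ hmem') with h | h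
        · exact absurd h ‹_›
        · exact h
      have htail_lt : (rest.dropWhile (· == l)).length < (l :: rest).length :=
        Nat.lt_succ_of_le (List.length_dropWhile_le _ _)
      rw [if_neg (by simp [hl])]
      rw [ih _ htail_lt _ _ hmemd rfl]
      -- findIdx over the skipped non-matching run
      have hfind : ((l :: rest).findIdx (· == "High") : Int)
          = 1 + ((rest.takeWhile (· == l)).length : Int)
            + ((rest.dropWhile (· == l)).findIdx (· == "High") : Int) := by
        have hsplit : rest = rest.takeWhile (· == l) ++ rest.dropWhile (· == l) :=
          (List.takeWhile_append_dropWhile (p := (· == l)) (l := rest)).symm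
        have hnot : ∀ x ∈ rest.takeWhile (· == l), ¬ (x == "High") = true := by
          intro x hx
          have := List.mem_takeWhile_imp hx
          simp at this ⊢
          subst this; exact fun h => hl h
        have hlen1 : (rest.takeWhile (· == l)).findIdx (· == "High")
            = (rest.takeWhile (· == l)).length :=
          List.findIdx_eq_length.2 (fun x hx => by simpa using hnot x hx)
        have hbl : (l == "High") = false := by simpa using hl
        rw [List.findIdx_cons, hbl]
        simp only [cond_false]
        conv_lhs => rw [hsplit]
        rw [List.findIdx_append, if_neg (by rw [hlen1]; omega)]
        push_cast
        omega
      rw [hfind]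
      congr 1
      ring

-- ===== VERDICT (by name: the statements are the Claim_ definitions above) =====
theorem detect_failure_index_spec : Claim_unchanged_detect_failure_index := by
  intro ws req _ hD
  unfold D_detect_failure_index at hD
  push Not at hD
  unfold detect_failure_index detect_failure_index_alt
  apply goA_eq_goB
  rcases lt_or_ge req 1 with h | h
  · exact Or.inr (hD h)
  · exact Or.inl h

theorem detect_failure_index_changed : Claim_changed_detect_failure_index := by
  unfold Claim_changed_detect_failure_index
  refine ⟨by decide, by decide, by decide, ?_, by decide⟩
  show detect_failure_index_alt ["High"] 0 = some 0
  unfold detect_failure_index_alt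
  rw [detectGoB]
  norm_num

theorem detect_failure_index_tight : Claim_exact_detect_failure_index := by
  intro ws req _ hD
  obtain ⟨hreq, hmem⟩ := hD
  unfold detect_failure_index detect_failure_index_alt
  rw [goA_neg ws 0 0 req hreq le_rfl hmem, goB_neg ws 0 req hreq hmem]
  simp
  omega
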